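-- pv_equiv track=rewrite | github.com/Arnthorny/alx-interview | 0x04-utf8_validation/0-validate_utf8.py | count_bytes
-- ===== SOURCE A (Python) =====
-- def count_bytes(val):
--     """
--     Function to count number of bytes used in encoding byte sequence.
--
--     Description:
--     UTF-8 encoding works as thus for different byte sequences:
--     1-byte:  First byte begins with 0
--     2-bytes: First byte of the 2 byte seq begins with 110
--     3-bytes: First byte of the 3 byte seq begins with 1110
--     4-bytes: First byte of the 4 byte seq begins with 11110
--
--     Subsequent bytes for multi-byte encoding begins with 10
--
--     Returns:
--         Number of byte as determined from starting bits in first byte else None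
--         if encoding is invalid.
--     """
--     new_val = val & 0xFF
--     s_byte_checker = [1 << 7, 0b11100000, 0b11110000, 0b11111000]
--     # start_byte = [0b0, 0b11000000, 0b11100000, 0b11110000]
--
--     for i in range(len(s_byte_checker)):
--         start_byte = 0 if i == 0 else s_byte_checker[i] & ~(1 << (8 - i - 2))
--         if new_val & s_byte_checker[i] == start_byte:
--             return i + 1
--
--     return None
-- ===== SOURCE B (Python) =====
-- def count_bytes(val):
--     """Count of bytes in a UTF-8 sequence from its first byte, computed
--     numerically from the number of leading one-bits instead of a mask table."""
--     n = val & 0xFF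
--     lo = 8 - (~n & 0xFF).bit_length()
--     if lo == 0:
--         return 1
--     if 2 <= lo <= 4:
--         return lo
--     return None
-- ===== Notes on version B (the rewrite author's own statement) =====
-- stated objective: simpler
-- what changed: Replaces the mask-table loop (four checker masks scanned in order, with the expected start byte recomputed from the index) by a direct numeric computation: count the leading one-bits of the byte via bit_length of its complement and map that count to the answer.
import Mathlib
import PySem

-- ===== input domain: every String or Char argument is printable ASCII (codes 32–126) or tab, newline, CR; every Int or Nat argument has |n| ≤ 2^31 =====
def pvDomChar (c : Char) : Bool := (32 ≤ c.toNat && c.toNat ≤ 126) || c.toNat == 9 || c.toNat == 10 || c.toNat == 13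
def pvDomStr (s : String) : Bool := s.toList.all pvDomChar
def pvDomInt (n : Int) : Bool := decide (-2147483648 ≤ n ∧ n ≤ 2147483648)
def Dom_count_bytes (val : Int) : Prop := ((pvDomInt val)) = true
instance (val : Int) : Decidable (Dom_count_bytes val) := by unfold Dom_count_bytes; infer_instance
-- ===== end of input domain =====

-- B replaces A's ordered mask-table scan by one numeric leading-ones computation (objective: simpler).

-- ===== PORT A =====
-- s_byte_checker = [1 << 7, 0b11100000, 0b11110000, 0b11111000]
def sByteChecker : List Int := [1 <<< 7, 0b11100000, 0b11110000, 0b11111000]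

-- 'for i in range(len(s_byte_checker)): …' with early return, as structural recursion
-- over the remaining indices; '~x' is written as Python defines it on ints, -x - 1.
def countBytesLoop (new_val : Int) : List Nat → Option Int
  | [] => none
  | i :: rest =>
    let start_byte : Int :=
      if i = 0 then 0
      else PySem.Int.band (sByteChecker.getD i 0) (-((1 <<< (8 - i - 2) : Int)) - 1)
    if PySem.Int.band new_val (sByteChecker.getD i 0) = start_byte then some ((i : Int) + 1)
    else countBytesLoop new_val rest

def count_bytes (val : Int) : Option Int :=
  let new_val := PySem.Int.band val 255
  countBytesLoop new_val (List.range sByteChecker.length)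

-- ===== PORT B =====
def countBytesAltBody (n : Int) : Option Int :=
  let lo : Int := 8 - (PySem.Int.bitLength (PySem.Int.band (-n - 1) 255) : Int)
  if lo = 0 then some 1
  else if 2 ≤ lo ∧ lo ≤ 4 then some lo
  else none

def count_bytes_alt (val : Int) : Option Int :=
  countBytesAltBody (PySem.Int.band val 255)

-- ===== PRECONDITION & SPEC =====
def Spec_count_bytes (val : Int) (out : Option Int) : Prop := out = count_bytes_alt val
instance (val : Int) (out : Option Int) : Decidable (Spec_count_bytes val out) := by unfold Spec_count_bytes; infer_instance

-- ===== CLAIM (what is proved, stated in full; the proofs are below) =====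
def Claim_equal_count_bytes : Prop := ∀ (val : Int), Dom_count_bytes val → Spec_count_bytes val (count_bytes val)

-- ===== LEMMAS AND PROOFS =====

-- val & 0xFF always lands in [0, 256), for every integer val
theorem band255_bounds (v : Int) : 0 ≤ PySem.Int.band v 255 ∧ PySem.Int.band v 255 < 256 := by
  unfold PySem.Int.band
  split_ifs with h1 h2 h2
  · have h : v.toNat &&& (255 : Int).toNat < 2 ^ 8 := Nat.and_lt_two_pow _ (by norm_num)
    have h' : v.toNat &&& (255 : Int).toNat < 256 := by simpa using h
    omega
  · exact absurd (by norm_num) h2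
  · have := Nat.sub_le (255 : Int).toNat ((255 : Int).toNat &&& (-v - 1).toNat)
    omega
  · exact absurd (by norm_num) h2

-- the two programs agree on every byte value
set_option maxRecDepth 16384 in
theorem agree_byte : ∀ m : Nat, m < 256 →
    countBytesLoop (m : Int) (List.range sByteChecker.length) = countBytesAltBody (m : Int) := by
  decide

-- ===== VERDICT (by name: the statement is the Claim_ definition above) =====
theorem count_bytes_spec : Claim_equal_count_bytes := by
  intro val _
  unfold Spec_count_bytes count_bytes count_bytes_alt
  obtain ⟨h0, h256⟩ := band255_bounds val
  have heq : PySem.Int.band val 255 = ((PySem.Int.band val 255).toNat : Int) := by omega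
  rw [heq]
  exact agree_byte _ (by omega)
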